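-- pv_equiv track=rewrite | github.com/travelmail26/chevdev | chef/analysisfolder/chunk_scanner_parallel.py | chunk_rows_by_session
-- ===== SOURCE A (Python) =====
-- from typing import Any, Dict, List, Optional, Tuple
--
-- def chunk_rows_by_session(rows: List[Dict[str, Any]], chunk_char_limit: int) -> List[List[Dict[str, Any]]]:
--     """
--     Packs rows into chunks by session_id, then by character budget.
--     This keeps each chunk within a single conversation.
--     """
--     chunks: List[List[Dict[str, Any]]] = []
--     current: List[Dict[str, Any]] = []
--     used = 0
--     current_session = None
--
--     for row in rows:
--         session_id = row.get("session_id")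
--         line = f"[{row['session_id']}|{row.get('session_date')}|{row.get('message_index')}|{row.get('role')}]: {row['content']}\n"
--         cost = len(line)
--
--         if current_session is None:
--             current_session = session_id
--
--         if session_id != current_session:
--             # Before: mixed sessions in a chunk -> After: chunks stay within one session.
--             if current:
--                 chunks.append(current)
--             current = []
--             used = 0
--             current_session = session_id
--
--         if current and used + cost > chunk_char_limit:
--             chunks.append(current)
--             current = []
--             used = 0
--
--         current.append(row)
--         used += cost
--
--     if current:
--         chunks.append(current)
--
--     return chunks
-- ===== SOURCE B (Python) =====
-- def _cost(row):
--     return len(f"[{row['session_id']}|{row.get('session_date')}|{row.get('message_index')}|{row.get('role')}]: {row['content']}\n")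
--
--
-- def chunk_rows_by_session(rows, chunk_char_limit):
--     """Peel one chunk at a time: scan for the maximal same-session prefix that
--     still fits the character budget (always at least one row), slice it off as
--     a chunk, and continue with the remainder."""
--     chunks = []
--     rest = rows
--     while rest:
--         sid = rest[0].get("session_id")
--         used = _cost(rest[0])
--         k = 1
--         while (k < len(rest)
--                and rest[k].get("session_id") == sid
--                and used + _cost(rest[k]) <= chunk_char_limit):
--             used += _cost(rest[k])
--             k += 1
--         chunks.append(rest[:k])
--         rest = rest[k:]
--     return chunks
-- ===== Notes on version B (the rewrite author's own statement) =====
-- stated objective: alternative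
-- what changed: B peels one chunk at a time: an inner scan finds the maximal same-session prefix that fits the budget, the chunk is sliced off and the outer loop continues on the remainder, so A's cross-row state (chunks/current/used/current_session threaded through one stateful pass) disappears.
import Mathlib
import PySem

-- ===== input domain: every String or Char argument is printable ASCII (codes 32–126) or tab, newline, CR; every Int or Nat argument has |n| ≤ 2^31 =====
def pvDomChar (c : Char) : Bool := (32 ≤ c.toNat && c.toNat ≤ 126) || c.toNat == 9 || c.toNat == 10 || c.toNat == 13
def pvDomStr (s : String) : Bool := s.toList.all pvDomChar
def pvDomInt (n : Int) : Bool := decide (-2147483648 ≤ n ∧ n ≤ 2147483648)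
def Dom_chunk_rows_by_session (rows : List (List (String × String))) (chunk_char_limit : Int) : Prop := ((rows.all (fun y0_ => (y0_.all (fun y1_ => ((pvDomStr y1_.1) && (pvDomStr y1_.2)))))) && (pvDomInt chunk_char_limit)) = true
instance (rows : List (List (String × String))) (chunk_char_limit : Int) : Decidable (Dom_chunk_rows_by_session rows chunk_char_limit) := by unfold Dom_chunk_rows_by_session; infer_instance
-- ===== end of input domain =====

-- B peels one chunk at a time (scan the maximal same-session in-budget prefix, slice it off,
-- continue on the remainder) instead of A's single stateful pass; return-value equivalence on Pre_.

-- shared helpers: first-match association lookup (= dict lookup), the f-string line and its length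
def pvRowGet (row : List (String × String)) (k : String) : Option String :=
  (row.find? (fun p => p.1 == k)).map (·.2)

def pvDisp : Option String → List Char
  | some s => s.toList
  | none => ['N', 'o', 'n', 'e']

def pvLine (row : List (String × String)) : List Char :=
  ['['] ++ pvDisp (pvRowGet row "session_id") ++ ['|'] ++ pvDisp (pvRowGet row "session_date")
    ++ ['|'] ++ pvDisp (pvRowGet row "message_index") ++ ['|'] ++ pvDisp (pvRowGet row "role")
    ++ [']', ':', ' '] ++ pvDisp (pvRowGet row "content") ++ ['\n']

def pvCost (row : List (String × String)) : Int := ((pvLine row).length : Int)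

-- ===== PORT A =====
-- A's for-loop, state = (chunks, current, used, current_session); current_session : Option (Option String)
-- (outer none = Python's initial None sentinel, inner Option = row.get may be None)
def chunkA_loop (limit : Int) : List (List (String × String)) → List (List (List (String × String))) →
    List (List (String × String)) → Int → Option (Option String) → List (List (List (String × String)))
  | [], chunks, current, _, _ => if current = [] then chunks else chunks ++ [current]
  | row :: rest, chunks, current, used, cs =>
    let sid := pvRowGet row "session_id"
    let cost := pvCost row
    let cs' := if cs = none then some sid else cs
    if some sid ≠ cs' then
      -- session change: flush current (if nonempty), reset; the budget test then sees an empty current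
      chunkA_loop limit rest (if current = [] then chunks else chunks ++ [current]) [row] cost (some sid)
    else
      if current ≠ [] ∧ used + cost > limit then
        chunkA_loop limit rest (chunks ++ [current]) [row] cost cs'
      else
        chunkA_loop limit rest chunks (current ++ [row]) (used + cost) cs'

def chunk_rows_by_session (rows : List (List (String × String))) (chunk_char_limit : Int) : List (List (List (String × String))) :=
  chunkA_loop chunk_char_limit rows [] [] 0 none

-- ===== PORT B =====
-- Source B's inner while: over the tail after the first row of `rest`, count how many further rows
-- share the session and keep the running total within the budget (exact transcription of the
-- `k < len(rest) and rest[k].get(..) == sid and used + cost <= limit` scan, k = 1 + this count)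
def pvTakeK (limit : Int) (s : Option String) : Int → List (List (String × String)) → Nat
  | _, [] => 0
  | used, x :: xs =>
    if pvRowGet x "session_id" = s ∧ used + pvCost x ≤ limit then
      1 + pvTakeK limit s (used + pvCost x) xs
    else 0

-- Source B's outer while: chunks.append(rest[:k]); rest = rest[k:]  (recursion on the remainder)
def chunkB_loop (limit : Int) : List (List (String × String)) → List (List (List (String × String)))
  | [] => []
  | r :: rs =>
    let k := 1 + pvTakeK limit (pvRowGet r "session_id") (pvCost r) rs
    (r :: rs).take k :: chunkB_loop limit ((r :: rs).drop k)
  termination_by l => l.length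
  decreasing_by
    simp only [List.length_drop, List.length_cons]
    omega

def chunk_rows_by_session_alt (rows : List (List (String × String))) (chunk_char_limit : Int) : List (List (List (String × String))) :=
  chunkB_loop chunk_char_limit rows

-- ===== PRECONDITION & SPEC =====
-- Pre_ excludes rows missing the 'session_id' or 'content' key, on which both Pythons raise KeyError.
def Pre_chunk_rows_by_session (rows : List (List (String × String))) (chunk_char_limit : Int) : Prop :=
  ∀ row ∈ rows, (pvRowGet row "session_id").isSome ∧ (pvRowGet row "content").isSome

instance (rows : List (List (String × String))) (chunk_char_limit : Int) : Decidable (Pre_chunk_rows_by_session rows chunk_char_limit) := by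
  unfold Pre_chunk_rows_by_session; infer_instance

def pvWitness_chunk_rows_by_session : (List (List (String × String))) × Int :=
  ([[("session_id", "a"), ("content", "hi")], [("session_id", "b"), ("content", "yo"), ("role", "u")]], 30)

def Spec_chunk_rows_by_session (rows : List (List (String × String))) (chunk_char_limit : Int) (out : List (List (List (String × String)))) : Prop := out = chunk_rows_by_session_alt rows chunk_char_limit
instance (rows : List (List (String × String))) (chunk_char_limit : Int) (out : List (List (List (String × String)))) : Decidable (Spec_chunk_rows_by_session rows chunk_char_limit out) := by unfold Spec_chunk_rows_by_session; infer_instance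

-- ===== CLAIM (what is proved, stated in full; the proofs are below) =====
def Claim_equal_chunk_rows_by_session : Prop := ∀ (rows : List (List (String × String))) (chunk_char_limit : Int), Dom_chunk_rows_by_session rows chunk_char_limit → Pre_chunk_rows_by_session rows chunk_char_limit → Spec_chunk_rows_by_session rows chunk_char_limit (chunk_rows_by_session rows chunk_char_limit)

-- ===== LEMMAS AND PROOFS =====

-- proof-side fused packer: A's loop once the session sentinel is set
def pk (limit : Int) : List (List (String × String)) → List (List (String × String)) → Int → Option String → List (List (List (String × String)))
  | [], cur, _, _ => if cur = [] then [] else [cur]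
  | r :: rs, cur, used, s =>
    let cost := pvCost r
    if pvRowGet r "session_id" = s then
      if cur ≠ [] ∧ used + cost > limit then cur :: pk limit rs [r] cost s
      else pk limit rs (cur ++ [r]) (used + cost) s
    else
      (if cur = [] then [] else [cur]) ++ pk limit rs [r] cost (pvRowGet r "session_id")

theorem chunkA_loop_eq_pk (limit : Int) (rows : List (List (String × String)))
    (chunks : List (List (List (String × String)))) (cur : List (List (String × String))) (used : Int) (s : Option String) :
    chunkA_loop limit rows chunks cur used (some s) = chunks ++ pk limit rows cur used s := by
  induction rows generalizing chunks cur used s with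
  | nil => by_cases h : cur = [] <;> simp [chunkA_loop, pk, h]
  | cons r rs ih =>
    simp only [chunkA_loop, pk]
    have hif : (if (some s : Option (Option String)) = none then some (pvRowGet r "session_id") else some s) = some s := rfl
    rw [hif]
    by_cases hs : pvRowGet r "session_id" = s
    · rw [if_neg (by simp [hs] : ¬ some (pvRowGet r "session_id") ≠ some s), if_pos hs]
      by_cases hb : cur ≠ [] ∧ used + pvCost r > limit
      · rw [if_pos hb, if_pos hb, ih]; simp
      · rw [if_neg hb, if_neg hb, ih]
    · rw [if_pos (by simp [hs]), if_neg hs, ih]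
      by_cases h : cur = [] <;> simp [h]

-- pk with a nonempty current chunk = take the scanned prefix, then B's loop on the remainder
theorem pk_eq_chunkB (limit : Int) :
    ∀ (l cur : List (List (String × String))) (used : Int) (s : Option String), cur ≠ [] →
      pk limit l cur used s =
        (cur ++ l.take (pvTakeK limit s used l)) :: chunkB_loop limit (l.drop (pvTakeK limit s used l)) := by
  intro l
  induction l with
  | nil => intro cur used s hc; simp [pk, pvTakeK, chunkB_loop, hc]
  | cons x xs ih =>
    intro cur used s hc
    by_cases hs : pvRowGet x "session_id" = s
    · by_cases hfit : used + pvCost x ≤ limit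
      · have hk : pvTakeK limit s used (x :: xs) = 1 + pvTakeK limit s (used + pvCost x) xs := by
          simp [pvTakeK, hs, hfit]
        have hnb : ¬ (cur ≠ [] ∧ used + pvCost x > limit) := by
          intro h; exact absurd hfit (not_le.mpr h.2)
        rw [hk]
        simp only [pk, if_pos hs, if_neg hnb]
        rw [ih (cur ++ [x]) (used + pvCost x) s (by simp)]
        simp [Nat.add_comm 1]
      · have hk : pvTakeK limit s used (x :: xs) = 0 := by
          simp [pvTakeK, hfit]
        have hb : cur ≠ [] ∧ used + pvCost x > limit := ⟨hc, lt_of_not_ge hfit⟩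
        rw [hk]
        simp only [pk, if_pos hs, if_pos hb, List.take_zero, List.drop_zero, List.append_nil]
        rw [ih [x] (pvCost x) s (by simp)]
        rw [chunkB_loop]
        simp [hs, Nat.add_comm 1, List.take_succ_cons, List.drop_succ_cons]
    · have hk : pvTakeK limit s used (x :: xs) = 0 := by
        simp [pvTakeK, hs]
      rw [hk]
      simp only [pk, if_neg hs, if_neg hc, List.take_zero, List.drop_zero, List.append_nil]
      rw [ih [x] (pvCost x) (pvRowGet x "session_id") (by simp)]
      rw [chunkB_loop]
      simp [Nat.add_comm 1, List.take_succ_cons, List.drop_succ_cons]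

-- ===== VERDICT (by name: the statement is the Claim_ definition above) =====
theorem chunk_rows_by_session_spec : Claim_equal_chunk_rows_by_session := by
  intro rows limit _ _
  unfold Spec_chunk_rows_by_session chunk_rows_by_session chunk_rows_by_session_alt
  cases rows with
  | nil => simp [chunkA_loop, chunkB_loop]
  | cons r rs =>
    have h1 : chunkA_loop limit (r :: rs) [] [] 0 none =
        chunkA_loop limit rs [] [r] (pvCost r) (some (pvRowGet r "session_id")) := by
      simp [chunkA_loop]
    rw [h1, chunkA_loop_eq_pk, List.nil_append,
      pk_eq_chunkB limit rs [r] (pvCost r) (pvRowGet r "session_id") (by simp)]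
    rw [chunkB_loop]
    simp [Nat.add_comm 1]
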